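-- pv_equiv track=rewrite | github.com/nengcham/Python-Study | 2.cording_test/solved/0827_01.py | solution
-- ===== SOURCE A (Python) =====
-- def solution(n, m, x_axis, y_axis):
--     x_axis.insert(0, 0)
--     x_axis.append(n)
--     x_list = []
--     for i, j in enumerate(x_axis):
--         try:
--             x_list.append(x_axis[i+1] - x_axis[i])
--         except:
--             pass
--
--     y_axis.insert(0, 0)
--     y_axis.append(m)
--     y_list = []
--     for i, j in enumerate(y_axis):
--         try:
--             y_list.append(y_axis[i+1] - y_axis[i])
--         except:
--             pass
--
--     x_list.sort()
--     y_list.sort()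
--     answer = x_list[-1]*y_list[-1]
--     return answer
-- ===== SOURCE B (Python) =====
-- def solution(n, m, x_axis, y_axis):
--     # Single pass: track max consecutive gap directly, no sorting.
--     # (Unlike A, does not mutate x_axis / y_axis; equivalence is about the return value.)
--     def max_gap(axis, end):
--         prev = 0
--         best = None
--         for v in axis + [end]:
--             d = v - prev
--             if best is None or d > best:
--                 best = d
--             prev = v
--         return best
--     return max_gap(x_axis, n) * max_gap(y_axis, m)
-- ===== Notes on version B (the rewrite author's own statement) =====
-- stated objective: faster
-- what changed: Replaced building a difference list, sorting it and reading its last element by a single pass that tracks the running maximum consecutive gap; no sort, no intermediate lists.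
import Mathlib
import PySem

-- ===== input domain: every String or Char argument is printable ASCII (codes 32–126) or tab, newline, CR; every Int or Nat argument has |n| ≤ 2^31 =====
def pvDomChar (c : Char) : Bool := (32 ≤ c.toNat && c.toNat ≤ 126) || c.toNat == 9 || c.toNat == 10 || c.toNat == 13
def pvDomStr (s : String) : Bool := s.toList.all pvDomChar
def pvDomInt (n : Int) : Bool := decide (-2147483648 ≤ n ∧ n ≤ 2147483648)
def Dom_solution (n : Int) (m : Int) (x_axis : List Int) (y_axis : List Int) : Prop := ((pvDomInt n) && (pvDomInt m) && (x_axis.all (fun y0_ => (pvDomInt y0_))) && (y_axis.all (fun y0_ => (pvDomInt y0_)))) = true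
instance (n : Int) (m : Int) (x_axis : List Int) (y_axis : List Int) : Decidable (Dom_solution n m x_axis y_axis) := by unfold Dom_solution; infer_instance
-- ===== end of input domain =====

-- B replaces A's build-diff-list / sort / read-last-element by a single pass that tracks the
-- running maximum consecutive gap. A mutates x_axis/y_axis in place (insert/append); B does
-- not — the equivalence proved here is about the return value only.

-- ===== PORT A =====
-- the loop 'for i, j in enumerate(axis): try: lst.append(axis[i+1] - axis[i]) except: pass'
-- (the IndexError at the last i is the 'except: pass' branch → the 'none' case appends nothing)
def solGather (xa : List Int) : List Int :=
  (PySem.List.enumerate xa 0).foldl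
    (fun acc ij =>
      match PySem.List.pyGet? xa (ij.1 + 1), PySem.List.pyGet? xa ij.1 with
      | some a, some b => acc ++ [a - b]
      | _, _ => acc)
    []

def solution (n : Int) (m : Int) (x_axis : List Int) (y_axis : List Int) : Int :=
  let xa := 0 :: (x_axis ++ [n])      -- x_axis.insert(0, 0); x_axis.append(n)
  let ya := 0 :: (y_axis ++ [m])      -- y_axis.insert(0, 0); y_axis.append(m)
  let x_list := solGather xa
  let y_list := solGather ya
  let xs := PySem.List.sorted x_list (fun x => x) false    -- x_list.sort()
  let ys := PySem.List.sorted y_list (fun x => x) false    -- y_list.sort()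
  -- x_list/y_list always have ≥ 1 element (xa/ya have ≥ 2), so x_list[-1]/y_list[-1] never
  -- raise; the pyGetD default 0 is unreachable.
  PySem.List.pyGetD xs (-1) 0 * PySem.List.pyGetD ys (-1) 0

-- ===== PORT B =====
-- Source B's max_gap: one fold over axis + [end] with state (prev, best); best is None before the
-- first element; axis + [end] is nonempty, so the final best is always some (.getD 0 unreachable).
def maxGapAlt (axis : List Int) (e : Int) : Int :=
  ((axis ++ [e]).foldl
    (fun (st : Int × Option Int) v =>
      let d := v - st.1
      (v, match st.2 with
          | none => some d
          | some b => if d > b then some d else some b))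
    (0, none)).2.getD 0

def solution_alt (n : Int) (m : Int) (x_axis : List Int) (y_axis : List Int) : Int :=
  maxGapAlt x_axis n * maxGapAlt y_axis m

-- ===== PRECONDITION & SPEC =====
def Spec_solution (n : Int) (m : Int) (x_axis : List Int) (y_axis : List Int) (out : Int) : Prop := out = solution_alt n m x_axis y_axis
instance (n : Int) (m : Int) (x_axis : List Int) (y_axis : List Int) (out : Int) : Decidable (Spec_solution n m x_axis y_axis out) := by unfold Spec_solution; infer_instance

-- ===== CLAIM (what is proved, stated in full; the proofs are below) =====
def Claim_equal_solution : Prop := ∀ (n : Int) (m : Int) (x_axis : List Int) (y_axis : List Int), Dom_solution n m x_axis y_axis → Spec_solution n m x_axis y_axis (solution n m x_axis y_axis)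

-- ===== LEMMAS AND PROOFS =====

-- the list of consecutive differences of prev :: pts
def diffs : Int → List Int → List Int
  | _, [] => []
  | p, v :: t => (v - p) :: diffs v t

-- A's gather loop, started at index k on the suffix xa.drop k, appends exactly the
-- consecutive differences of that suffix
theorem gatherAux (xa : List Int) (t : List Int) : ∀ (k : Nat) (acc : List Int), xa.drop k = t →
    (PySem.List.enumerate t (k : Int)).foldl
      (fun acc ij =>
        match PySem.List.pyGet? xa (ij.1 + 1), PySem.List.pyGet? xa ij.1 with
        | some a, some b => acc ++ [a - b]
        | _, _ => acc) acc
      = acc ++ (match t with | [] => [] | p :: t' => diffs p t') := by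
  induction t with
  | nil => intro k acc h; simp [PySem.List.enumerate]
  | cons v t' ih =>
    intro k acc h
    have hget : PySem.List.pyGet? xa (k : Int) = some v := by
      rw [PySem.List.pyGet?_natCast]
      have : (List.drop k xa)[0]? = some v := by rw [h]; rfl
      rwa [List.getElem?_drop, Nat.add_zero] at this
    have hdrop' : xa.drop (k+1) = t' := by
      rw [← List.tail_drop, h]; rfl
    have hget1 : PySem.List.pyGet? xa ((k : Int) + 1) = t'[0]? := by
      have : ((k : Int) + 1) = ((k+1 : Nat) : Int) := by push_cast; ring
      rw [this, PySem.List.pyGet?_natCast]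
      rw [← hdrop', List.getElem?_drop, Nat.add_zero]
    rw [PySem.List.enumerate_cons]
    simp only [List.foldl_cons]
    cases t' with
    | nil =>
      simp only at hget1
      rw [hget1, hget]
      simp [PySem.List.enumerate, diffs]
    | cons w t'' =>
      simp only [List.getElem?_cons_zero] at hget1
      rw [hget1, hget]
      have hc : ((k : Int) + 1) = ((k+1 : Nat) : Int) := by push_cast; ring
      rw [hc, ih (k+1) (acc ++ [w - v]) hdrop']
      simp [diffs]

theorem solGather_eq (xa : List Int) : solGather xa = (match xa with
    | [] => []
    | p :: t => diffs p t) := by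
  have := gatherAux xa xa 0 [] (by simp)
  simpa [solGather] using this

-- B's fold with best already some b: a running max of the remaining differences
theorem foldB_some (pts : List Int) : ∀ (prev b : Int),
    ((pts.foldl (fun (st : Int × Option Int) v =>
        (v, match st.2 with
            | none => some (v - st.1)
            | some b => if v - st.1 > b then some (v - st.1) else some b)) (prev, some b)).2)
      = some ((diffs prev pts).foldl max b) := by
  induction pts with
  | nil => intro prev b; simp [diffs]
  | cons v t ih =>
    intro prev b
    have hmax : (if v - prev > b then some (v - prev) else some b) = some (max b (v - prev)) := by
      split_ifs with h <;> congr 1 <;> omega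
    simp only [List.foldl_cons]
    show ((t.foldl _ (v, if v - prev > b then some (v - prev) else some b)).2) = _
    rw [hmax, ih v (max b (v - prev))]
    simp [diffs]

theorem maxGapAlt_eq (axis : List Int) (e : Int) :
    maxGapAlt axis e =
      (match diffs 0 (axis ++ [e]) with
      | [] => 0
      | d :: t => t.foldl max d) := by
  cases axis with
  | nil =>
    simp [maxGapAlt, diffs]
  | cons v t =>
    simp only [maxGapAlt, List.cons_append, List.foldl_cons]
    show ((t ++ [e]).foldl _ (v, some (v - 0))).2.getD 0 = _
    rw [foldB_some]
    simp [diffs]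

-- the last element of a Python-sorted nonempty Int list is its running max
theorem sorted_last_eq_foldl_max (d : Int) (t : List Int) :
    PySem.List.pyGetD (PySem.List.sorted (d :: t) (fun x => x) false) (-1) 0 = t.foldl max d := by
  have hne : PySem.List.sorted (d :: t) (fun x => x) false ≠ [] := by
    simp [PySem.List.sorted_eq_nil_iff]
  rw [PySem.List.pyGetD_neg_one _ _ hne]
  have hmax : PySem.List.max? (d :: t) (fun y => y) = some (t.foldl max d) :=
    PySem.List.max?_id_cons d t
  have hisMax := PySem.List.max?_isMax hmax
  have hlast_mem : (PySem.List.sorted (d :: t) (fun x => x) false).getLast hne ∈ d :: t := by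
    rw [← PySem.List.mem_sorted (d :: t) (fun x => x) false]
    exact List.getLast_mem hne
  have h1 : (PySem.List.sorted (d :: t) (fun x => x) false).getLast hne ≤ t.foldl max d :=
    hisMax _ hlast_mem
  have hmem_s : t.foldl max d ∈ PySem.List.sorted (d :: t) (fun x => x) false := by
    rw [PySem.List.mem_sorted]
    exact PySem.List.max?_mem hmax
  obtain ⟨p, hp, hpe⟩ := List.getElem_of_mem hmem_s
  have hlen : 0 < (PySem.List.sorted (d :: t) (fun x => x) false).length :=
    List.length_pos_iff.mpr hne
  have h2 : t.foldl max d ≤ (PySem.List.sorted (d :: t) (fun x => x) false).getLast hne := by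
    rw [List.getLast_eq_getElem]
    calc t.foldl max d = (PySem.List.sorted (d :: t) (fun x => x) false)[p] := hpe.symm
      _ ≤ _ := PySem.List.key_sorted_getElem_mono (d :: t) (fun x => x) (by omega) (by omega)
  exact le_antisymm h1 h2

-- one axis: A's sorted-last of the gathered differences equals B's single-pass max gap
theorem side_eq (axis : List Int) (e : Int) :
    PySem.List.pyGetD (PySem.List.sorted (solGather (0 :: (axis ++ [e]))) (fun x => x) false) (-1) 0
      = maxGapAlt axis e := by
  obtain ⟨v, t, h⟩ : ∃ v t, axis ++ [e] = v :: t := by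
    cases axis with
    | nil => exact ⟨e, [], rfl⟩
    | cons a t => exact ⟨a, t ++ [e], rfl⟩
  rw [solGather_eq, maxGapAlt_eq]
  simp only [h, diffs]
  exact sorted_last_eq_foldl_max _ _

-- ===== VERDICT (by name: the statement is the Claim_ definition above) =====
theorem solution_spec : Claim_equal_solution := by
  intro n m x_axis y_axis _
  unfold Spec_solution
  simp only [solution, solution_alt]
  rw [side_eq, side_eq]
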